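-- pv_equiv track=rewrite | github.com/blegloannec/CodeProblems | HackerRank/keyword_transposition_cipher.py | gen_sub
-- ===== SOURCE A (Python) =====
-- def gen_sub(K):
--     used = set()
--     G = []
--     for c in K:
--         if c not in used:
--             G.append([c])
--             used.add(c)
--     col = 0
--     for c in 'ABCDEFGHIJKLMNOPQRSTUVWXYZ':
--         if c not in used:
--             G[col].append(c)
--             col = (col+1)%len(G)
--             used.add(c)
--     G.sort()
--     B = ''.join(''.join(Col) for Col in G)
--     invSub = {B[i]: chr(i+ord('A')) for i in range(26)}
--     invSub[' '] = ' '
--     return invSub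
-- ===== SOURCE B (Python) =====
-- def gen_sub(K):
--     heads = list(dict.fromkeys(K))
--     w = len(heads)
--     ks = set(K)
--     remaining = [c for c in 'ABCDEFGHIJKLMNOPQRSTUVWXYZ' if c not in ks]
--     cols = sorted([heads[i]] + remaining[i::w] for i in range(w))
--     B = ''.join(''.join(col) for col in cols)
--     invSub = {B[i]: chr(i + ord('A')) for i in range(26)}
--     invSub[' '] = ' '
--     return invSub
-- ===== Notes on version B (the rewrite author's own statement) =====
-- stated objective: simpler
-- what changed: Replaces A's stateful round-robin dispatch loop (mutable column list, running col=(col+1)%len(G) counter, membership set threaded across two loops) by building each column directly as dedup'd-keyword head plus the strided slice remaining[i::w].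
-- outside the precondition, e.g. on gen_sub(''): A raises IndexError, B raises IndexError
import Mathlib
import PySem

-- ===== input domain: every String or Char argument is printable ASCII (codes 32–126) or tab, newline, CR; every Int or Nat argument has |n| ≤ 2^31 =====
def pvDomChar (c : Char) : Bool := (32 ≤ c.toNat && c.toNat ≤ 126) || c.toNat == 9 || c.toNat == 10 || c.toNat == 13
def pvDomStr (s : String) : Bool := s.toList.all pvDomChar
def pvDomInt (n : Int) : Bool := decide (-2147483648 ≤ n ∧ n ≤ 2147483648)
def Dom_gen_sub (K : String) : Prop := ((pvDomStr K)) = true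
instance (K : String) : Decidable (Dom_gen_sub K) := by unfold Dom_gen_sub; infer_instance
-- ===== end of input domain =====

-- B builds each cipher column directly (dedup'd keyword head + strided slice remaining[i::w])
-- instead of A's stateful round-robin dispatch loop; objective: simpler.

def pvAlpha : List Char := "ABCDEFGHIJKLMNOPQRSTUVWXYZ".toList

-- ===== PORT A =====
def gen_sub (K : String) : List (String × String) :=
  -- for c in K: if c not in used: G.append([c]); used.add(c)
  let s0 : PySem.Set Char × List (List Char) :=
    K.toList.foldl (fun st c =>
      if PySem.Set.contains st.1 c then st
      else (PySem.Set.add st.1 c, st.2 ++ [[c]])) (PySem.Set.empty, [])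
  -- for c in alphabet: if c not in used: G[col].append(c); col=(col+1)%len(G); used.add(c)
  -- state (G, col, used); col is always in range when G ≠ [] (Pre_); G = [] is Python's IndexError
  let s1 : List (List Char) × Nat × PySem.Set Char :=
    pvAlpha.foldl (fun st c =>
      if PySem.Set.contains st.2.2 c then st
      else (st.1.set st.2.1 (st.1.getD st.2.1 [] ++ [c]),
            (st.2.1 + 1) % st.1.length, PySem.Set.add st.2.2 c)) (s0.2, 0, s0.1)
  let Gs := PySem.List.sorted s1.1 (fun x => x) false
  -- B = ''.join(''.join(Col) for Col in G): join of char-list columns = flatten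
  let B : List Char := (Gs.map (fun col => col)).flatten
  -- invSub = {B[i]: chr(i+65) for i in range(26)}; B[i] in range under Pre_
  let d : PySem.Dict String String :=
    (PySem.List.pyRange 0 26 1).foldl (fun d i =>
      d.insert (String.ofList [PySem.List.pyGetD B i ' ']) (String.ofList [Char.ofNat (i + 65).toNat]))
      PySem.Dict.empty
  (d.insert " " " ").items

-- ===== PORT B =====
def gen_sub_alt (K : String) : List (String × String) :=
  let heads := PySem.List.dedup K.toList            -- list(dict.fromkeys(K))
  let w := heads.length
  let ks : PySem.Set Char := PySem.Set.ofList K.toList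
  let remaining := pvAlpha.filter (fun c => !(PySem.Set.contains ks c))
  -- [[heads[i]] + remaining[i::w] for i in range(w)]; i < w so heads[i] is safe, w > 0 so the slice is some
  let cols := (List.range w).map (fun i =>
      heads.getD i ' ' :: ((PySem.List.slice? remaining (some (i : Int)) none (w : Int)).getD []))
  let colsS := PySem.List.sorted cols (fun x => x) false
  let B : List Char := (colsS.map (fun col => col)).flatten
  let d : PySem.Dict String String :=
    (PySem.List.pyRange 0 26 1).foldl (fun d i =>
      d.insert (String.ofList [PySem.List.pyGetD B i ' ']) (String.ofList [Char.ofNat (i + 65).toNat]))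
      PySem.Dict.empty
  (d.insert " " " ").items

-- ===== PRECONDITION & SPEC =====
-- On K = '' both A and B raise IndexError (A at G[0], B at B[0]); everywhere else A returns.
def Pre_gen_sub (K : String) : Prop := K ≠ ""
instance (K : String) : Decidable (Pre_gen_sub K) := by unfold Pre_gen_sub; infer_instance
def pvWitness_gen_sub : String := "SECRET"

def Spec_gen_sub (K : String) (out : List (String × String)) : Prop := out = gen_sub_alt K
instance (K : String) (out : List (String × String)) : Decidable (Spec_gen_sub K out) := by
  unfold Spec_gen_sub; infer_instance

-- ===== CLAIM (what is proved, stated in full; the proofs are below) =====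
def Claim_equal_gen_sub : Prop :=
  ∀ (K : String), Dom_gen_sub K → Pre_gen_sub K → Spec_gen_sub K (gen_sub K)

-- ===== LEMMAS AND PROOFS =====

-- remaining[j::w] as a structural recursion (proof-only helper)
def strideCh : List Char → Nat → Nat → List Char
  | [], _, _ => []
  | x :: xs, 0, w => x :: strideCh xs (w - 1) w
  | _ :: xs, j + 1, w => strideCh xs j w

-- A's round-robin distribution loop, with the membership test already discharged
def rrDist : List (List Char) → Nat → List Char → List (List Char)
  | G, _, [] => G
  | G, col, c :: cs => rrDist (G.set col (G.getD col [] ++ [c])) ((col + 1) % G.length) cs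

theorem contains_add_ne (s : PySem.Set Char) (x y : Char) (h : y ≠ x) :
    PySem.Set.contains (PySem.Set.add s x) y = PySem.Set.contains s y := by
  unfold PySem.Set.add
  split
  · rfl
  · show List.contains (s ++ [x]) y = List.contains s y
    by_cases hy : y ∈ s <;> simp [List.contains_eq_mem, hy, h]

theorem loop1_eq (l : List Char) :
    ∀ (used : PySem.Set Char) (G : List (List Char)), G = used.map (fun c => [c]) →
    l.foldl (fun st c =>
        if PySem.Set.contains st.1 c then st
        else (PySem.Set.add st.1 c, st.2 ++ [[c]])) (used, G)
      = (l.foldl PySem.Set.add used,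
         (l.foldl PySem.Set.add used).map (fun c => [c])) := by
  induction l with
  | nil => intro used G hG; simp [hG]
  | cons c cs ih =>
    intro used G hG
    simp only [List.foldl_cons]
    by_cases h : PySem.Set.contains used c = true
    · have hadd : PySem.Set.add used c = used := by unfold PySem.Set.add; rw [if_pos h]
      rw [if_pos h, hadd]
      exact ih used G hG
    · have hadd : PySem.Set.add used c = used ++ [c] := by unfold PySem.Set.add; rw [if_neg h]
      rw [if_neg h, hadd]
      exact ih (used ++ [c]) (G ++ [[c]]) (by simp [hG])

theorem loop2_eq (l : List Char) :
    ∀ (G : List (List Char)) (col : Nat) (used : PySem.Set Char), l.Nodup →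
    (l.foldl (fun st c =>
        if PySem.Set.contains st.2.2 c then st
        else (st.1.set st.2.1 (st.1.getD st.2.1 [] ++ [c]),
              (st.2.1 + 1) % st.1.length, PySem.Set.add st.2.2 c)) (G, col, used)).1
      = rrDist G col (l.filter (fun c => !(PySem.Set.contains used c))) := by
  induction l with
  | nil => intro G col used _; simp [rrDist]
  | cons c cs ih =>
    intro G col used hnd
    have hnd' : cs.Nodup := hnd.of_cons
    have hc : c ∉ cs := (List.nodup_cons.mp hnd).1
    simp only [List.foldl_cons, List.filter_cons]
    by_cases h : PySem.Set.contains used c = true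
    · rw [if_pos h]
      have hb : (!PySem.Set.contains used c) = false := by rw [h]; rfl
      rw [hb]
      simp only [Bool.false_eq_true, if_neg, not_false_iff]
      exact ih G col used hnd'
    · rw [if_neg h]
      have hb : (!PySem.Set.contains used c) = true := by
        cases hcc : PySem.Set.contains used c
        · rfl
        · exact absurd hcc h
      rw [hb]
      simp only [if_pos]
      rw [ih _ _ _ hnd']
      have hfil : cs.filter (fun c' => !(PySem.Set.contains (PySem.Set.add used c) c'))
          = cs.filter (fun c' => !(PySem.Set.contains used c')) := by
        apply List.filter_congr
        intro x hx
        have hxc : x ≠ c := fun he => hc (he ▸ hx)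
        rw [contains_add_ne used c x hxc]
      rw [hfil]
      rfl

theorem map_range_getD (l : List (List Char)) :
    (List.range l.length).map (fun i => l.getD i []) = l := by
  apply List.ext_getElem
  · simp
  · intro i h1 h2
    simp [List.getD_eq_getElem?_getD, List.getElem?_eq_getElem h2]

theorem off_succ (w i col : Nat) (hcol : col < w) (hi : i < w) (hne : i ≠ col) :
    (i + w - col) % w = (i + w - (col + 1) % w) % w + 1 := by
  rcases Nat.lt_or_ge (col + 1) w with h | h
  · rw [Nat.mod_eq_of_lt h]
    rcases lt_or_gt_of_ne hne with hlt | hgt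
    · rw [Nat.mod_eq_of_lt (by omega), Nat.mod_eq_of_lt (by omega)]
      omega
    · have e1 : i + w - col = (i - col) + w := by omega
      have e2 : i + w - (col + 1) = (i - col - 1) + w := by omega
      rw [e1, e2, Nat.add_mod_right, Nat.add_mod_right,
          Nat.mod_eq_of_lt (by omega), Nat.mod_eq_of_lt (by omega)]
      omega
  · have hcw : col + 1 = w := by omega
    have h0 : (col + 1) % w = 0 := by rw [hcw, Nat.mod_self]
    rw [h0]
    have e1 : i + w - col = i + 1 := by omega
    have e2 : i + w - 0 = i + w := by omega
    rw [e1, e2, Nat.add_mod_right, Nat.mod_eq_of_lt (by omega), Nat.mod_eq_of_lt (by omega)]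

theorem rr_to_stride (rem : List Char) :
    ∀ (G : List (List Char)) (col : Nat), col < G.length →
    rrDist G col rem
      = (List.range G.length).map
          (fun i => G.getD i [] ++ strideCh rem ((i + G.length - col) % G.length) G.length) := by
  induction rem with
  | nil =>
    intro G col _
    simp only [rrDist, strideCh, List.append_nil]
    exact (map_range_getD G).symm
  | cons c cs ih =>
    intro G col hcol
    have hw : 0 < G.length := Nat.lt_of_le_of_lt (Nat.zero_le _) hcol
    simp only [rrDist]
    have hlen : (G.set col (G.getD col [] ++ [c])).length = G.length := by simp
    have hcol' : (col + 1) % G.length < G.length := Nat.mod_lt _ hw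
    rw [ih _ _ (by rw [hlen]; exact hcol')]
    rw [hlen]
    apply List.map_congr_left
    intro i hi
    have hi' : i < G.length := List.mem_range.mp hi
    by_cases hic : i = col
    · subst hic
      have hset : (G.set i (G.getD i [] ++ [c])).getD i [] = G.getD i [] ++ [c] := by
        simp [List.getD_eq_getElem?_getD, List.getElem?_set_self hi']
      have hoff0 : (i + G.length - i) % G.length = 0 := by
        have e : i + G.length - i = G.length := by omega
        rw [e, Nat.mod_self]
      have hoff1 : (i + G.length - (i + 1) % G.length) % G.length = G.length - 1 := by
        rcases Nat.lt_or_ge (i + 1) G.length with h | h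
        · rw [Nat.mod_eq_of_lt h, Nat.mod_eq_of_lt (by omega)]
          omega
        · have hcw : i + 1 = G.length := by omega
          rw [hcw, Nat.mod_self]
          have e : i + G.length - 0 = i + G.length := by omega
          rw [e, Nat.add_mod_right, Nat.mod_eq_of_lt (by omega)]
          omega
      rw [hset, hoff0, hoff1]
      simp [strideCh, List.append_assoc]
    · have hset : (G.set col (G.getD col [] ++ [c])).getD i [] = G.getD i [] := by
        simp [List.getD_eq_getElem?_getD, List.getElem?_set_ne (fun h => hic h.symm)]
      rw [hset, off_succ G.length i col hcol hi' hic]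
      rfl

theorem strideCh_getElem? (w : Nat) (hw : 0 < w) :
    ∀ (l : List Char) (i n : Nat), (strideCh l i w)[n]? = l[i + w * n]? := by
  intro l
  induction l with
  | nil => intro i n; simp [strideCh]
  | cons x xs ih =>
    intro i n
    cases i with
    | zero =>
      cases n with
      | zero => simp [strideCh]
      | succ m =>
        have hh : 0 + w * (m + 1) = (w - 1 + w * m) + 1 := by
          have h2 : w * (m + 1) = w * m + w := by ring
          omega
        rw [hh]
        simp only [strideCh, List.getElem?_cons_succ]
        exact ih (w - 1) m
    | succ j =>
      have hh : (j + 1) + w * n = (j + w * n) + 1 := by omega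
      rw [hh]
      simp only [strideCh, List.getElem?_cons_succ]
      exact ih j n

theorem ceil_lt_iff (D w n : Nat) (hw : 0 < w) (hD : 0 < D) :
    n < (D + w - 1) / w ↔ w * n < D := by
  constructor
  · intro h
    have h2 : (n + 1) * w ≤ D + w - 1 := (Nat.le_div_iff_mul_le hw).mp h
    have h1 : (n + 1) * w = w * n + w := by ring
    rw [h1] at h2
    generalize w * n = m at h2 ⊢
    omega
  · intro h
    apply (Nat.le_div_iff_mul_le hw).mpr
    have h1 : (n + 1) * w = w * n + w := by ring
    rw [h1]
    generalize w * n = m at h ⊢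
    omega

theorem slice_stride (l : List Char) (i w : Nat) (hw : 0 < w) :
    PySem.List.slice? l (some (i : Int)) none (w : Int) = some (strideCh l i w) := by
  have hw0 : ¬ ((w : Int) = 0) := by omega
  have hwneg : ¬ ((w : Int) < 0) := by omega
  have hineg : ¬ ((i : Int) < 0) := by omega
  have hwpos : (0 : Int) < (w : Int) := by omega
  unfold PySem.List.slice? PySem.List.sliceIndices
  rw [if_neg hw0]
  simp only [hwneg, if_false, hineg, hwpos, if_true]
  by_cases hil : i < l.length
  · have hmin : min (i : Int) (l.length : Int) = (i : Int) := by omega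
    have hlt : (i : Int) < (l.length : Int) := by omega
    rw [hmin, if_pos hlt]
    have hD : 0 < l.length - i := by omega
    have hcast : ((l.length : Int) - (i : Int) + (w : Int) - 1) = (((l.length - i + w - 1 : Nat)) : Int) := by
      omega
    rw [hcast]
    rw [show (((l.length - i + w - 1 : Nat) : Int) / (w : Int)) = (((l.length - i + w - 1) / w : Nat) : Int) from (Int.natCast_div _ _).symm]
    rw [Int.toNat_natCast]
    congr 1
    have hfm : ∀ x ∈ List.range ((l.length - i + w - 1) / w),
        l[(((i : Int)) + (w : Int) * (x : Int)).toNat]? = (some ∘ fun k => l.getD (i + w * k) 'A') x := by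
      intro x hx
      have hxlt : x < (l.length - i + w - 1) / w := List.mem_range.mp hx
      have hb : w * x < l.length - i := (ceil_lt_iff _ w x hw hD).mp hxlt
      have hidx : ((i : Int) + (w : Int) * (x : Int)).toNat = i + w * x := by
        have e : ((i : Int) + (w : Int) * (x : Int)) = ((i + w * x : Nat) : Int) := by push_cast; ring
        rw [e, Int.toNat_natCast]
      rw [hidx]
      have hlen : i + w * x < l.length := by omega
      simp [List.getElem?_eq_getElem hlen, List.getD_eq_getElem?_getD, Function.comp]
    rw [List.filterMap_congr hfm, List.filterMap_eq_map]
    apply List.ext_getElem?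
    intro n
    rw [strideCh_getElem? w hw]
    by_cases hn : n < (l.length - i + w - 1) / w
    · have hb : w * n < l.length - i := (ceil_lt_iff _ w n hw hD).mp hn
      have hlen : i + w * n < l.length := by omega
      rw [List.getElem?_map]
      rw [List.getElem?_range hn]
      simp [List.getElem?_eq_getElem hlen, List.getD_eq_getElem?_getD]
    · have hb : ¬ (w * n < l.length - i) := fun hc => hn ((ceil_lt_iff _ w n hw hD).mpr hc)
      have h1 : (List.map (fun k => l.getD (i + w * k) 'A') (List.range ((l.length - i + w - 1) / w)))[n]? = none := by
        apply List.getElem?_eq_none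
        simpa using Nat.le_of_not_lt hn
      rw [h1]
      symm
      apply List.getElem?_eq_none
      omega
  · have hmin : min (i : Int) (l.length : Int) = (l.length : Int) := by omega
    have hnlt : ¬ ((l.length : Int) < (l.length : Int)) := by omega
    rw [hmin, if_neg hnlt]
    simp only [List.range_zero, List.filterMap_nil]
    congr 1
    symm
    apply List.ext_getElem?
    intro n
    rw [strideCh_getElem? w hw]
    rw [List.getElem?_nil]
    apply List.getElem?_eq_none
    have : w * n ≥ 0 := Nat.zero_le _
    omega

theorem cols_eq (K : String) (hK : K.toList ≠ []) :
    (pvAlpha.foldl (fun st c =>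
        if PySem.Set.contains st.2.2 c then st
        else (st.1.set st.2.1 (st.1.getD st.2.1 [] ++ [c]),
              (st.2.1 + 1) % st.1.length, PySem.Set.add st.2.2 c))
      (((PySem.Set.ofList K.toList).map (fun c => [c])), 0, PySem.Set.ofList K.toList)).1
    = (List.range (PySem.List.dedup K.toList).length).map (fun i =>
        (PySem.List.dedup K.toList).getD i ' ' ::
          ((PySem.List.slice? (pvAlpha.filter (fun c => !(PySem.Set.contains (PySem.Set.ofList K.toList) c)))
              (some (i : Int)) none ((PySem.List.dedup K.toList).length : Int)).getD [])) := by
  have hnodup : pvAlpha.Nodup := by decide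
  have hS : PySem.List.dedup K.toList = PySem.Set.ofList K.toList := rfl
  obtain ⟨c, t, hct⟩ : ∃ c t, K.toList = c :: t := by
    cases h : K.toList with
    | nil => exact absurd h hK
    | cons c t => exact ⟨c, t, rfl⟩
  have hmem : c ∈ PySem.Set.ofList K.toList := by
    rw [PySem.Set.mem_ofList, hct]; exact List.mem_cons_self ..
  have hSne : PySem.Set.ofList K.toList ≠ [] := fun h => by rw [h] at hmem; exact absurd hmem (List.not_mem_nil)
  have hw : 0 < (PySem.Set.ofList K.toList).length := List.length_pos_of_ne_nil hSne
  rw [loop2_eq pvAlpha _ 0 _ hnodup]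
  have hGlen : ((PySem.Set.ofList K.toList).map (fun c => [c])).length = (PySem.Set.ofList K.toList).length := by simp
  rw [rr_to_stride _ _ 0 (by rw [hGlen]; exact hw)]
  rw [hGlen, hS]
  apply List.map_congr_left
  intro i hi
  have hi' : i < (PySem.Set.ofList K.toList).length := List.mem_range.mp hi
  have h1 : ((PySem.Set.ofList K.toList).map (fun c => [c])).getD i []
      = [(PySem.Set.ofList K.toList).getD i ' '] := by
    simp [List.getD_eq_getElem?_getD, List.getElem?_map, List.getElem?_eq_getElem hi']
  have h2 : (i + (PySem.Set.ofList K.toList).length - 0) % (PySem.Set.ofList K.toList).length = i := by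
    have e : i + (PySem.Set.ofList K.toList).length - 0 = i + (PySem.Set.ofList K.toList).length := by omega
    rw [e, Nat.add_mod_right, Nat.mod_eq_of_lt hi']
  rw [h1, h2, slice_stride _ i _ hw]
  rfl

-- ===== VERDICT (by name: the statement is the Claim_ definition above) =====
theorem gen_sub_spec : Claim_equal_gen_sub := by
  intro K _ hpre
  unfold Spec_gen_sub gen_sub gen_sub_alt
  have hKl : K.toList ≠ [] := by
    intro hn
    apply hpre
    have := congrArg String.ofList hn
    simpa using this
  rw [loop1_eq K.toList PySem.Set.empty [] (by simp)]
  have hfold : K.toList.foldl PySem.Set.add PySem.Set.empty = PySem.Set.ofList K.toList := rfl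
  rw [hfold]
  dsimp only
  rw [cols_eq K hKl]
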